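-- pv_equiv track=rewrite | github.com/Leyandre/Metro_project | Projet Métro.py | search_station_word
-- ===== SOURCE A (Python) =====
-- def search_station_word(answer, dico_station):
--     #Recherche toutes les stations dont le nom commence par l'input dans la barre de recherche
--     station_poss = [[], []]
--
--     #station_poss[0][X] -> Station X possiblement rechercher par l'utilisateur
--     #station_poss[1][X][Y] -> Station Y alterego de la station X
--
--     for station in dico_station:
--
--         if answer not in dico_station[station][0].lower() and answer not in dico_station[station][0].upper():
--             #Si l'input n'est pas trouvé au début du nom de la station on passe à la prochaine station
--             continue
--         else:
--             if len(station_poss[0]) == 0 or dico_station[station][0] != dico_station[station_poss[0][-1]][0]: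
--                 #Si la liste est encore vierge ou si ce n'est pas une station déjà mise dans la liste
--                 station_poss[0].append(station)
--                 station_poss[1].append([station])
--             else:
--                 #sinon la station a déjà été implanté dans la liste sous une ligne différente et on garde celle-ci dans une liste d'alterego
--                 station_poss[1][-1].append(station)
--
--     if len(station_poss[0]) == 0:
--         return None
--
--     return station_poss
-- ===== SOURCE B (Python) =====
-- def search_station_word(answer, dico_station):
--     # Two-phase rewrite: first collect the matching (key, name) pairs once,
--     # then group consecutive runs of equal names from the front.
--     matches = [(station, names[0]) for station, names in dico_station.items()
--                if answer in names[0].lower() or answer in names[0].upper()]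
--     if not matches:
--         return None
--     firsts, groups = [], []
--     i, n = 0, len(matches)
--     while i < n:
--         j = i
--         while j < n and matches[j][1] == matches[i][1]:
--             j += 1
--         run = [station for station, _ in matches[i:j]]
--         firsts.append(run[0])
--         groups.append(run)
--         i = j
--     return [firsts, groups]
-- ===== Notes on version B (the rewrite author's own statement) =====
-- stated objective: alternative
-- what changed: A's single stateful loop, which re-reads each name through dict lookups (including a lookup keyed by its own output-so-far) while growing station_poss in place, is replaced by two phases: build the list of matching (key, name) pairs once, then split it into consecutive runs of equal names and emit each run's first key and key list.
-- outside the precondition, e.g. on search_station_word('a', {'k': []}): A raises IndexError, B raises IndexError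
import Mathlib
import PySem

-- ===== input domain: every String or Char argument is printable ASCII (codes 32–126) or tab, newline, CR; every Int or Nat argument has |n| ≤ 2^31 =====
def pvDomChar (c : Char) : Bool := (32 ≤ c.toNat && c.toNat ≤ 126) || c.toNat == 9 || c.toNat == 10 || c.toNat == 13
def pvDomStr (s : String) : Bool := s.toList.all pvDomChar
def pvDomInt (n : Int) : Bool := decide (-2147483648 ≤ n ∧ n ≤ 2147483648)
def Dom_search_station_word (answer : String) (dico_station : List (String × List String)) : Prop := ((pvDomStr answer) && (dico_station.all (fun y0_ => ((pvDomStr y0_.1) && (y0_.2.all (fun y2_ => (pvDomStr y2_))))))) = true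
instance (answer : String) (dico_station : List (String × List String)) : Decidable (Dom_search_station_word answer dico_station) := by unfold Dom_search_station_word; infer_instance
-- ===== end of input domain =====

-- B rewrites A's single stateful loop (which re-looks names up through the dict and inspects
-- its own output-so-far) as two phases: collect matching (key, name) pairs once, then split
-- that list into consecutive runs of equal names; objective: simpler/alternative decomposition.

-- ===== PORT A =====
-- answer in name.lower() or answer in name.upper()  (Python 'in' on str = substring test)
def pvMatchA (answer name : String) : Bool :=
  PySem.Str.isIn answer (PySem.Str.lower name) || PySem.Str.isIn answer (PySem.Str.upper name)

-- dico_station[station][0]: dict lookup then element 0 (headD "" is only reached where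
-- Python would raise; Pre_ excludes empty value lists and, for the lookup, duplicate keys)
def pvNameOf (dico : List (String × List String)) (station : String) : String :=
  ((PySem.Dict.mk dico).getD station []).headD ""

-- one iteration of A's for-loop body, state = (station_poss[0], station_poss[1])
def pvStepA (answer : String) (dico : List (String × List String))
    (s : List String × List (List String)) (station : String) :
    List String × List (List String) :=
  if !(pvMatchA answer (pvNameOf dico station)) then s
  else if s.1.isEmpty || (pvNameOf dico station != pvNameOf dico (s.1.getLastD "")) then
    (s.1 ++ [station], s.2 ++ [[station]])
  else
    (s.1, s.2.dropLast ++ [s.2.getLastD [] ++ [station]])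

def search_station_word (answer : String) (dico_station : List (String × List String)) :
    Option (List String × List (List String)) :=
  let res := ((PySem.Dict.mk dico_station).keys).foldl (pvStepA answer dico_station) ([], [])
  if res.1.isEmpty then none else some res

-- ===== PORT B =====
-- Source B's outer while loop: take the maximal run of pairs sharing the first pair's name,
-- emit (first key, run keys), recurse on the rest
def pvGroupB : List (String × String) → List String × List (List String)
  | [] => ([], [])
  | x :: xs =>
    let sp := xs.span (fun y => y.2 == x.2)
    let rest := pvGroupB sp.2
    (x.1 :: rest.1, (x.1 :: sp.1.map Prod.fst) :: rest.2)
termination_by l => l.length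
decreasing_by
  simp only [List.span_eq_takeWhile_dropWhile]
  exact Nat.lt_succ_of_le (List.length_dropWhile_le _ _)

def search_station_word_alt (answer : String) (dico_station : List (String × List String)) :
    Option (List String × List (List String)) :=
  let pvMs := dico_station.filterMap (fun p =>
    let name := p.2.headD ""   -- names[0]; headD only reached where Python would raise
    if pvMatchA answer name then some (p.1, name) else none)
  if pvMs.isEmpty then none
  else some (pvGroupB pvMs)

-- ===== PRECONDITION & SPEC =====
-- Pre_ excludes dicts holding an empty name list (A raises IndexError on names[0]) and
-- association lists with duplicate keys, which do not represent a Python dict (dict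
-- construction collapses them, so key-based lookup and per-entry values may disagree).
def Pre_search_station_word (answer : String) (dico_station : List (String × List String)) : Prop :=
  (∀ p ∈ dico_station, p.2 ≠ []) ∧ (dico_station.map Prod.fst).Nodup
instance (answer : String) (dico_station : List (String × List String)) : Decidable (Pre_search_station_word answer dico_station) := by unfold Pre_search_station_word; infer_instance

def pvWitness_search_station_word : String × (List (String × List String)) :=
  ("ga", [("7", ["Gare de l'Est"]), ("4", ["Gare du Nord"]), ("5", ["Gare du Nord"])])

def Spec_search_station_word (answer : String) (dico_station : List (String × List String)) (out : Option (List String × List (List String))) : Prop := out = search_station_word_alt answer dico_station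
instance (answer : String) (dico_station : List (String × List String)) (out : Option (List String × List (List String))) : Decidable (Spec_search_station_word answer dico_station out) := by unfold Spec_search_station_word; infer_instance

-- ===== CLAIM (what is proved, stated in full; the proofs are below) =====
def Claim_equal_search_station_word : Prop := ∀ (answer : String) (dico_station : List (String × List String)), Dom_search_station_word answer dico_station → Pre_search_station_word answer dico_station → Spec_search_station_word answer dico_station (search_station_word answer dico_station)

-- ===== LEMMAS AND PROOFS =====

-- the list of matching (key, name) pairs (B's first phase)
def pvPairs (answer : String) (d : List (String × List String)) : List (String × String) :=
  d.filterMap (fun p =>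
    if pvMatchA answer (p.2.headD "") then some (p.1, p.2.headD "") else none)

-- runs of consecutive pairs with equal names (the shape B's while loop peels off)
def pvRuns : List (String × String) → List (List (String × String))
  | [] => []
  | x :: xs =>
    let sp := xs.span (fun y => y.2 == x.2)
    (x :: sp.1) :: pvRuns sp.2
termination_by l => l.length
decreasing_by
  simp only [List.span_eq_takeWhile_dropWhile]
  exact Nat.lt_succ_of_le (List.length_dropWhile_le _ _)

-- one A-loop iteration expressed on the run structure
def pvGstep (gs : List (List (String × String))) (x : String × String) :
    List (List (String × String)) :=
  if gs.isEmpty || (x.2 != ((gs.getLastD []).headD ("", "")).2) then gs ++ [[x]]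
  else gs.dropLast ++ [gs.getLastD [] ++ [x]]

-- project a run structure onto A's state (station_poss[0], station_poss[1])
def pvRender (gs : List (List (String × String))) : List String × List (List String) :=
  (gs.map (fun r => (r.headD ("", "")).1), gs.map (fun r => r.map Prod.fst))

theorem pvGetLastD_map {α β : Type} (l : List α) (f : α → β) (h : l ≠ []) (d : α) (d' : β) :
    (l.map f).getLastD d' = f (l.getLastD d) := by
  rw [List.getLastD_eq_getLast?, List.getLastD_eq_getLast?, List.getLast?_map,
      List.getLast?_eq_some_getLast h]
  rfl

theorem pvDropLast_append_getLastD {α : Type} (l : List α) (h : l ≠ []) (d : α) :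
    l.dropLast ++ [l.getLastD d] = l := by
  rw [List.getLastD_eq_getLast?, List.getLast?_eq_some_getLast h]
  exact List.dropLast_append_getLast h

theorem pvHeadD_append {α : Type} (r t : List α) (h : r ≠ []) (d : α) :
    (r ++ t).headD d = r.headD d := by
  cases r with
  | nil => simp at h
  | cons a s => simp

-- B's while loop computes the rendered runs
theorem pvGroupB_eq (l : List (String × String)) : pvGroupB l = pvRender (pvRuns l) := by
  induction l using pvGroupB.induct with
  | case1 => simp [pvGroupB, pvRuns, pvRender]
  | case2 x xs sp ih =>
    rw [pvGroupB, pvRuns]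
    simp only [pvRender, sp, List.span_eq_takeWhile_dropWhile] at ih ⊢
    rw [ih]
    simp

-- folding pvGstep from a nonempty accumulator grows the last run then continues
theorem pvFoldl_gstep (ms : List (String × String)) :
    ∀ (gs : List (List (String × String))) (r : List (String × String)), r ≠ [] →
    ms.foldl pvGstep (gs ++ [r]) =
      gs ++ ((r ++ ms.takeWhile (fun y => y.2 == (r.headD ("", "")).2)) ::
             pvRuns (ms.dropWhile (fun y => y.2 == (r.headD ("", "")).2))) := by
  induction ms with
  | nil => intro gs r hr; simp [pvRuns]
  | cons x xs ih =>
    intro gs r hr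
    rw [List.foldl_cons]
    by_cases hx : x.2 = (r.headD ("", "")).2
    · have hstep : pvGstep (gs ++ [r]) x = gs ++ [r ++ [x]] := by
        simp [pvGstep, hx]
      rw [hstep, ih gs (r ++ [x]) (by simp), pvHeadD_append r [x] hr]
      simp [hx]
    · have hx' : ¬x.2 = (r.head?.getD ("", "")).2 := by simpa using hx
      have hstep : pvGstep (gs ++ [r]) x = (gs ++ [r]) ++ [[x]] := by
        simp [pvGstep, bne_iff_ne]
        exact fun h => absurd h hx'
      rw [hstep, ih (gs ++ [r]) [x] (by simp)]
      simp [pvRuns, List.span_eq_takeWhile_dropWhile, hx']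

theorem pvFoldl_gstep_nil (ms : List (String × String)) :
    ms.foldl pvGstep [] = pvRuns ms := by
  cases ms with
  | nil => simp [pvRuns]
  | cons x xs =>
    have h1 : pvGstep [] x = [] ++ [[x]] := by simp [pvGstep]
    rw [List.foldl_cons, h1, pvFoldl_gstep xs [] [x] (by simp)]
    simp [pvRuns, List.span_eq_takeWhile_dropWhile]

-- name lookup through the dict agrees with the entry's own value under Nodup keys
theorem pvNameOf_mem (dico : List (String × List String)) (p : String × List String)
    (hmem : p ∈ dico) (hnd : (dico.map Prod.fst).Nodup) :
    pvNameOf dico p.1 = p.2.headD "" := by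
  have h : (PySem.Dict.mk dico).get? p.1 = some p.2 :=
    PySem.Dict.get?_of_mem_items (d := PySem.Dict.mk dico) hmem hnd
  simp [pvNameOf, PySem.Dict.getD_eq_get?_getD, h]

-- invariant carried by the main loop lemma
def pvInv (dico : List (String × List String)) (gs : List (List (String × String))) : Prop :=
  ∀ r ∈ gs, r ≠ [] ∧ ∀ q ∈ r, pvNameOf dico q.1 = q.2

theorem pvHeadD_mem {α : Type} (l : List α) (h : l ≠ []) (d : α) : l.headD d ∈ l := by
  cases l with
  | nil => simp at h
  | cons a t => simp

-- one matching iteration of A's loop, on rendered states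
theorem pvStep_render (answer : String) (dico : List (String × List String))
    (gs : List (List (String × String))) (k : String) (n : String)
    (hinv : pvInv dico gs) (hname : pvNameOf dico k = n) (hm : pvMatchA answer n = true) :
    pvStepA answer dico (pvRender gs) k = pvRender (pvGstep gs (k, n)) := by
  unfold pvStepA
  rw [hname, hm]
  simp only [Bool.not_true, Bool.false_eq_true, if_false]
  cases gs with
  | nil => simp [pvRender, pvGstep]
  | cons g gt =>
    have hgs : (g :: gt) ≠ [] := by simp
    have hlr_mem : (g :: gt).getLastD [] ∈ (g :: gt) := by
      rw [List.getLastD_eq_getLast?, List.getLast?_eq_some_getLast hgs]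
      exact List.getLast_mem hgs
    obtain ⟨hlr_ne, hlr_names⟩ := hinv _ hlr_mem
    have hhead_mem := pvHeadD_mem _ hlr_ne ("", "")
    have h1 : (pvRender (g :: gt)).1.getLastD "" = (((g :: gt).getLastD []).headD ("", "")).1 := by
      simpa [pvRender] using
        pvGetLastD_map (g :: gt) (fun r => (r.headD ("", "")).1) hgs [] ""
    have hprev : pvNameOf dico ((pvRender (g :: gt)).1.getLastD "") =
        (((g :: gt).getLastD []).headD ("", "")).2 := by
      rw [h1]; exact hlr_names _ hhead_mem
    have hne1 : (pvRender (g :: gt)).1.isEmpty = false := by simp [pvRender]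
    rw [hne1, hprev]
    by_cases hc : n = (((g :: gt).getLastD []).headD ("", "")).2
    · -- same name: both extend the last run
      have hsplit : (g :: gt).dropLast ++ [(g :: gt).getLastD []] = g :: gt :=
        pvDropLast_append_getLastD _ hgs []
      simp only [← hc, pvGstep, List.isEmpty_cons, Bool.false_or, bne_self_eq_false,
        Bool.false_eq_true, if_false, pvRender, Prod.mk.injEq]
      refine ⟨?_, ?_⟩
      · conv_lhs => rw [← hsplit]
        rw [List.map_append, List.map_append]
        rcases List.exists_cons_of_ne_nil hlr_ne with ⟨a, t, hat⟩
        have hat' : (g :: gt).getLast?.getD [] = a :: t := by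
          rw [← List.getLastD_eq_getLast?]; exact hat
        simp [hat']
      · rw [List.map_append, ← List.map_dropLast,
          pvGetLastD_map (g :: gt) (fun r => r.map Prod.fst) hgs [] []]
        simp
    · -- different name: both start a new run
      have hcb : (n != (((g :: gt).getLastD []).headD ("", "")).2) = true := by
        simpa [bne_iff_ne] using hc
      simp only [pvGstep, List.isEmpty_cons, hcb, Bool.or_true, if_true,
        pvRender, List.map_append]
      simp

-- the loop invariant is preserved by one pvGstep step
theorem pvInv_gstep (dico : List (String × List String)) (gs : List (List (String × String)))
    (k n : String) (hinv : pvInv dico gs) (hname : pvNameOf dico k = n) :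
    pvInv dico (pvGstep gs (k, n)) := by
  unfold pvGstep
  split
  · intro r hr
    rcases List.mem_append.1 hr with h | h
    · exact hinv r h
    · simp at h
      subst h
      exact ⟨by simp, by intro q hq; simp at hq; subst hq; exact hname⟩
  · rename_i hcond
    have hgs : gs ≠ [] := by
      intro h; subst h; simp at hcond
    have hlr_mem : gs.getLastD [] ∈ gs := by
      rw [List.getLastD_eq_getLast?, List.getLast?_eq_some_getLast hgs]
      exact List.getLast_mem hgs
    obtain ⟨hlr_ne, hlr_names⟩ := hinv _ hlr_mem
    rw [List.getLastD_eq_getLast?] at hlr_ne hlr_names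
    intro r hr
    rcases List.mem_append.1 hr with h | h
    · exact hinv r (List.dropLast_subset _ h)
    · simp at h
      subst h
      refine ⟨by simp [hlr_ne], ?_⟩
      intro q hq
      rcases List.mem_append.1 hq with h | h
      · exact hlr_names q h
      · simp at h; subst h; exact hname

-- A's loop over the remaining keys = pvGstep-fold over the remaining matching pairs
theorem pvLoopA (answer : String) (dico : List (String × List String))
    (hnd : (dico.map Prod.fst).Nodup) (suffix : List (String × List String)) :
    ∀ (gs : List (List (String × String))),
    (∀ p ∈ suffix, p ∈ dico) → pvInv dico gs →
    (suffix.map Prod.fst).foldl (pvStepA answer dico) (pvRender gs) =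
      pvRender ((pvPairs answer suffix).foldl pvGstep gs) := by
  induction suffix with
  | nil => intro gs _ _; simp [pvPairs]
  | cons p rest ih =>
    intro gs hsub hinv
    have hp : p ∈ dico := hsub p (by simp)
    have hname : pvNameOf dico p.1 = p.2.headD "" := pvNameOf_mem dico p hp hnd
    rw [List.map_cons, List.foldl_cons]
    by_cases hm : pvMatchA answer (p.2.headD "") = true
    · have hstep := pvStep_render answer dico gs p.1 (p.2.headD "") hinv hname hm
      have hm2 : pvMatchA answer (p.2.head?.getD "") = true := by simpa using hm
      have hpairs : pvPairs answer (p :: rest) = (p.1, p.2.headD "") :: pvPairs answer rest := by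
        simp [pvPairs, hm2]
      rw [hstep, hpairs, List.foldl_cons]
      exact ih (pvGstep gs (p.1, p.2.headD ""))
        (fun q hq => hsub q (List.mem_cons_of_mem _ hq))
        (pvInv_gstep dico gs p.1 (p.2.headD "") hinv hname)
    · have hm' : pvMatchA answer (p.2.headD "") = false := by simpa using hm
      have hstep : pvStepA answer dico (pvRender gs) p.1 = pvRender gs := by
        unfold pvStepA; rw [hname, hm']; simp
      have hm2 : pvMatchA answer (p.2.head?.getD "") = false := by simpa using hm'
      have hpairs : pvPairs answer (p :: rest) = pvPairs answer rest := by
        simp [pvPairs, hm2]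
      rw [hstep, hpairs]
      exact ih gs (fun q hq => hsub q (List.mem_cons_of_mem _ hq)) hinv

theorem pvRuns_nil_iff (ms : List (String × String)) : pvRuns ms = [] ↔ ms = [] := by
  cases ms with
  | nil => simp [pvRuns]
  | cons x xs => simp [pvRuns]

-- ===== VERDICT (by name: the statement is the Claim_ definition above) =====
theorem search_station_word_spec : Claim_equal_search_station_word := by
  intro answer dico _ hpre
  unfold Spec_search_station_word search_station_word search_station_word_alt
  have hkeys : (PySem.Dict.mk dico).keys = dico.map Prod.fst := by
    simp [PySem.Dict.keys]
  have hmain := pvLoopA answer dico hpre.2 dico []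
    (fun p hp => hp) (by intro r hr; simp at hr)
  rw [hkeys]
  simp only []
  rw [show (pvRender []) = (([] : List String), ([] : List (List String))) from rfl] at hmain
  rw [hmain, pvFoldl_gstep_nil]
  have hfm : (List.filterMap (fun x =>
      if pvMatchA answer (x.2.headD "") = true then some (x.1, x.2.headD "") else none) dico) =
      pvPairs answer dico := rfl
  rw [hfm]
  rw [pvGroupB_eq]
  by_cases hms : pvPairs answer dico = []
  · simp [hms, pvRuns, pvRender]
  · have hruns : pvRuns (pvPairs answer dico) ≠ [] := by
      rwa [ne_eq, pvRuns_nil_iff]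
    have h1 : (pvRender (pvRuns (pvPairs answer dico))).1.isEmpty = false := by
      simp [pvRender, hruns]
    have h2 : (pvPairs answer dico).isEmpty = false := by
      simp [hms]
    rw [h1, h2]
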